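-- pv_equiv track=rewrite | github.com/DavAureliPhD/ETER_ImputationTechniques | Imputation_all/4_donor_imputation_relaxed.py | selezioneVar
-- ===== SOURCE A (Python) =====
-- from collections import Counter
--
-- def selezioneVar(data, variabili):
--
--     miss_t = ["m","a", "x", "xc", "xr", "nc", "c", "s", "Null"]
--     var_to_work = []
--     for cc in variabili:
--         valori = Counter(data[cc])
--         buono = True
--         for elem in miss_t:
--             if valori[elem] != 0:
--                 buono = False
--                 break
--         if buono == True:
--             var_to_work.append(cc)
--
--     return var_to_work
-- ===== SOURCE B (Python) =====
-- def selezioneVar(data, variabili):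
--     miss = {"m", "a", "x", "xc", "xr", "nc", "c", "s", "Null"}
--     return [cc for cc in variabili if not any(v in miss for v in data[cc])]
-- ===== Notes on version B (the rewrite author's own statement) =====
-- stated objective: simpler
-- what changed: Replaces the per-column Counter table plus a loop over the nine missing tokens by a single early-exit membership scan over the column's values against a precomputed token set, collected with a list comprehension.
import Mathlib
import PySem

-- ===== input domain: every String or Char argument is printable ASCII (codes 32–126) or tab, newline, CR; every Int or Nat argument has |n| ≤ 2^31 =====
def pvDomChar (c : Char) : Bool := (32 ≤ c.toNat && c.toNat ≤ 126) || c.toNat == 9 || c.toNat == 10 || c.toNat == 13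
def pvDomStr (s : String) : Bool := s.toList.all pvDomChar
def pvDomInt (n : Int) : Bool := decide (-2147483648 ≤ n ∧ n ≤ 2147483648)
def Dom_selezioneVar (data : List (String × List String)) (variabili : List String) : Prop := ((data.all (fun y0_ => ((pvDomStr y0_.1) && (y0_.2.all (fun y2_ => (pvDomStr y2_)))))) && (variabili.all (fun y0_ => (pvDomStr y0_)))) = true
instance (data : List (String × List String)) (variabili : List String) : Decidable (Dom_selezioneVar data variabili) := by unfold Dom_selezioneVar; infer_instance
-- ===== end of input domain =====

-- B replaces A's per-column Counter + token loop by a single early-exit scan of the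
-- column against a precomputed missing-token set (simpler; return value equivalence).
-- ===== PORT A =====
def missT_A : List String := ["m", "a", "x", "xc", "xr", "nc", "c", "s", "Null"]

-- the 'for elem in miss_t: if valori[elem] != 0: buono = False; break' loop
def buonoLoop (valori : PySem.Dict String Int) : List String → Bool
  | [] => true
  | elem :: rest => if valori.getD elem 0 ≠ 0 then false else buonoLoop valori rest

def selezioneVar (data : List (String × List String)) (variabili : List String) : List String :=
  variabili.foldl (fun var_to_work cc =>
    -- data[cc]: KeyError when cc is not a key; excluded by Pre_ (getD [] there)
    let valori := PySem.Dict.counter (((PySem.Dict.mk data).get? cc).getD [])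
    let buono := buonoLoop valori missT_A
    if buono = true then var_to_work ++ [cc] else var_to_work) []

-- ===== PORT B =====
def missSet_B : PySem.Set String := PySem.Set.ofList ["m", "a", "x", "xc", "xr", "nc", "c", "s", "Null"]

def selezioneVar_alt (data : List (String × List String)) (variabili : List String) : List String :=
  variabili.filter (fun cc =>
    !((((PySem.Dict.mk data).get? cc).getD []).any (fun v => missSet_B.contains v)))

-- ===== PRECONDITION & SPEC =====
-- Pre_ excludes exactly the inputs where data[cc] raises KeyError in both programs.
def Pre_selezioneVar (data : List (String × List String)) (variabili : List String) : Prop :=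
  ∀ cc ∈ variabili, ((PySem.Dict.mk data).get? cc).isSome = true
instance (data : List (String × List String)) (variabili : List String) : Decidable (Pre_selezioneVar data variabili) := by unfold Pre_selezioneVar; infer_instance
def pvWitness_selezioneVar : (List (String × List String)) × List String :=
  ([("c1", ["1", "m"]), ("c2", ["ok"])], ["c1", "c2"])
def Spec_selezioneVar (data : List (String × List String)) (variabili : List String) (out : List String) : Prop := out = selezioneVar_alt data variabili
instance (data : List (String × List String)) (variabili : List String) (out : List String) : Decidable (Spec_selezioneVar data variabili out) := by unfold Spec_selezioneVar; infer_instance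

-- ===== CLAIM (what is proved, stated in full; the proofs are below) =====
def Claim_equal_selezioneVar : Prop := ∀ (data : List (String × List String)) (variabili : List String), Dom_selezioneVar data variabili → Pre_selezioneVar data variabili → Spec_selezioneVar data variabili (selezioneVar data variabili)

-- ===== LEMMAS AND PROOFS =====

-- ===== VERDICT (by name: the statement is the Claim_ definition above) =====
lemma buonoLoop_eq_all (valori : PySem.Dict String Int) (l : List String) :
    buonoLoop valori l = l.all (fun e => valori.getD e 0 == 0) := by
  induction l with
  | nil => rfl
  | cons e rest ih => simp [buonoLoop, ih]; tauto

lemma all_count_eq_not_any_contains (col toks : List String) :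
    (toks.all (fun e => ((col.count e : Int) == 0))) = !(col.any (fun v => toks.contains v)) := by
  rcases h : col.any (fun v => toks.contains v) with _ | _
  · simp only [List.any_eq_false] at h
    simp only [Bool.not_false, List.all_eq_true, beq_iff_eq, Int.natCast_eq_zero, List.count_eq_zero]
    intro e he hmem
    exact h e hmem (by simpa using he)
  · simp only [List.any_eq_true] at h
    obtain ⟨v, hv, hmem⟩ := h
    simp only [Bool.not_true, List.all_eq_false]
    exact ⟨v, by simpa using hmem, by simp [List.count_eq_zero]; exact hv⟩

lemma buono_eq (col : List String) :
    buonoLoop (PySem.Dict.counter col) missT_A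
      = !(col.any (fun v => missSet_B.contains v)) := by
  rw [buonoLoop_eq_all]
  simp only [PySem.Dict.getD_counter, all_count_eq_not_any_contains]
  have hms : (fun v : String => missT_A.contains v) = (fun v => missSet_B.contains v) := by
    funext v
    simp [missSet_B, missT_A, PySem.Set.ofList, PySem.Set.add, PySem.Set.contains]
  rw [hms]

lemma sel_go (data : List (String × List String)) (l acc : List String) :
    l.foldl (fun var_to_work cc =>
        let valori := PySem.Dict.counter (((PySem.Dict.mk data).get? cc).getD [])
        let buono := buonoLoop valori missT_A
        if buono = true then var_to_work ++ [cc] else var_to_work) acc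
      = acc ++ l.filter (fun cc =>
          !((((PySem.Dict.mk data).get? cc).getD []).any (fun v => missSet_B.contains v))) := by
  induction l generalizing acc with
  | nil => simp
  | cons cc rest ih =>
    rw [List.foldl_cons, List.filter_cons]
    have hb := buono_eq (((PySem.Dict.mk data).get? cc).getD [])
    by_cases h : buonoLoop (PySem.Dict.counter (((PySem.Dict.mk data).get? cc).getD [])) missT_A = true
    · rw [if_pos h, ih, ← hb, h]
      simp
    · rw [if_neg h, ih, ← hb]
      simp only [Bool.not_eq_true] at h
      rw [h]
      simp

theorem selezioneVar_spec : Claim_equal_selezioneVar := by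
  intro data variabili _ _
  unfold Spec_selezioneVar selezioneVar selezioneVar_alt
  rw [sel_go]
  simp
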